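-- pv_equiv track=rewrite | github.com/Tignileef/Code | main.py | detect_issue_categories
-- ===== SOURCE A (Python) =====
-- def detect_issue_categories(parsed_logs):
--     categories = {
--         "vibration": [],
--         "cooling_temperature": [],
--         "thrust": [],
--         "guidance_sensor": [],
--         "structure_booster": [],
--         "telemetry_comm": [],
--         "oxygen_tank": [],
--         "mission_success": [],
--         "shutdown": []
--     }
--
--     for log in parsed_logs:
--         msg = log["message"].lower()
--
--         if "vibration" in msg:
--             categories["vibration"].append(log)
--
--         if "cooling" in msg or "temperature" in msg or "heat" in msg or "overheat" in msg:
--             categories["cooling_temperature"].append(log)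
--
--         if "thrust" in msg:
--             categories["thrust"].append(log)
--
--         if (
--             "guidance" in msg
--             or "sensor data" in msg
--             or "trajectory" in msg
--             or "deviating" in msg
--             or "navigation" in msg
--         ):
--             categories["guidance_sensor"].append(log)
--
--         if (
--             "structural integrity" in msg
--             or "booster assembly" in msg
--             or "booster section" in msg
--             or "structural damage" in msg
--         ):
--             categories["structure_booster"].append(log)
--
--         if (
--             "telemetry" in msg
--             or "signal lost" in msg
--             or "communication lost" in msg
--             or "communication failure" in msg
--             or "link lost" in msg
--             or "data loss" in msg
--         ):
--             categories["telemetry_comm"].append(log)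
--
--         if (
--             "oxygen" in msg
--             or "tank" in msg
--             or "unstable" in msg
--             or "explosion" in msg
--             or "explode" in msg
--         ):
--             categories["oxygen_tank"].append(log)
--
--         if (
--             "mission completed successfully" in msg
--             or "mission objectives achieved" in msg
--             or "satellite deployment successful" in msg
--             or "safely landed" in msg
--         ):
--             categories["mission_success"].append(log)
--
--         if "powered down" in msg or "shutdown" in msg:
--             categories["shutdown"].append(log)
--
--     return categories
-- ===== SOURCE B (Python) =====
-- # Table-driven rewrite: one ordered keyword table and a per-category dict
-- # comprehension replace A's nine hardcoded per-log branch blocks.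
-- RULES = [
--     ("vibration", ["vibration"]),
--     ("cooling_temperature", ["cooling", "temperature", "heat", "overheat"]),
--     ("thrust", ["thrust"]),
--     ("guidance_sensor", ["guidance", "sensor data", "trajectory", "deviating", "navigation"]),
--     ("structure_booster", ["structural integrity", "booster assembly", "booster section", "structural damage"]),
--     ("telemetry_comm", ["telemetry", "signal lost", "communication lost", "communication failure", "link lost", "data loss"]),
--     ("oxygen_tank", ["oxygen", "tank", "unstable", "explosion", "explode"]),
--     ("mission_success", ["mission completed successfully", "mission objectives achieved", "satellite deployment successful", "safely landed"]),
--     ("shutdown", ["powered down", "shutdown"]),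
-- ]
--
--
-- def detect_issue_categories(parsed_logs):
--     return {
--         cat: [log for log in parsed_logs
--               if any(kw in log["message"].lower() for kw in kws)]
--         for cat, kws in RULES
--     }
-- ===== Notes on version B (the rewrite author's own statement) =====
-- stated objective: idiomatic
-- what changed: Nine hardcoded per-log branch blocks appending into a mutable dict become an ordered keyword table driving a per-category dict comprehension (one filter pass per category instead of a branch cascade per log).
import Mathlib
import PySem

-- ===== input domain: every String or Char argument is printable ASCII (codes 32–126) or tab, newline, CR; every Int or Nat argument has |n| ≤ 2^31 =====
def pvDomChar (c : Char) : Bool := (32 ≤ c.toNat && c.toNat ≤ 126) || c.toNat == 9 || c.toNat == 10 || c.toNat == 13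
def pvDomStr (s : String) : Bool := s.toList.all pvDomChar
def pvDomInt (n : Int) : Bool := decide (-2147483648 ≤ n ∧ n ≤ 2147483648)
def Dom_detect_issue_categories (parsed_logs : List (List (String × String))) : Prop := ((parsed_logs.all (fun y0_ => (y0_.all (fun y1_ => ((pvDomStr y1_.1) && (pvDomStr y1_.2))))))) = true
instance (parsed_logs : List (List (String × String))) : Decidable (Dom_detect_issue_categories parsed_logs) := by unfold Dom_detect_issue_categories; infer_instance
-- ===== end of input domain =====

-- B replaces A's nine hardcoded per-log branch blocks by an ordered keyword table
-- driving a per-category dict comprehension (idiomatic; same return value).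

-- msg = log["message"].lower() (the key exists on every input admitted by Pre_)
def pvLow (log : List (String × String)) : String :=
  PySem.Str.lower (((PySem.Dict.ofList log).get? "message").getD "")

-- ===== PORT A =====
def pvStep (cats : PySem.Dict String (List (List (String × String))))
    (log : List (String × String)) : PySem.Dict String (List (List (String × String))) :=
  let msg := pvLow log
  let cats := if PySem.Str.isIn "vibration" msg then cats.modify "vibration" [] (· ++ [log]) else cats
  let cats := if PySem.Str.isIn "cooling" msg || PySem.Str.isIn "temperature" msg || PySem.Str.isIn "heat" msg || PySem.Str.isIn "overheat" msg then cats.modify "cooling_temperature" [] (· ++ [log]) else cats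
  let cats := if PySem.Str.isIn "thrust" msg then cats.modify "thrust" [] (· ++ [log]) else cats
  let cats := if PySem.Str.isIn "guidance" msg || PySem.Str.isIn "sensor data" msg || PySem.Str.isIn "trajectory" msg || PySem.Str.isIn "deviating" msg || PySem.Str.isIn "navigation" msg then cats.modify "guidance_sensor" [] (· ++ [log]) else cats
  let cats := if PySem.Str.isIn "structural integrity" msg || PySem.Str.isIn "booster assembly" msg || PySem.Str.isIn "booster section" msg || PySem.Str.isIn "structural damage" msg then cats.modify "structure_booster" [] (· ++ [log]) else cats
  let cats := if PySem.Str.isIn "telemetry" msg || PySem.Str.isIn "signal lost" msg || PySem.Str.isIn "communication lost" msg || PySem.Str.isIn "communication failure" msg || PySem.Str.isIn "link lost" msg || PySem.Str.isIn "data loss" msg then cats.modify "telemetry_comm" [] (· ++ [log]) else cats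
  let cats := if PySem.Str.isIn "oxygen" msg || PySem.Str.isIn "tank" msg || PySem.Str.isIn "unstable" msg || PySem.Str.isIn "explosion" msg || PySem.Str.isIn "explode" msg then cats.modify "oxygen_tank" [] (· ++ [log]) else cats
  let cats := if PySem.Str.isIn "mission completed successfully" msg || PySem.Str.isIn "mission objectives achieved" msg || PySem.Str.isIn "satellite deployment successful" msg || PySem.Str.isIn "safely landed" msg then cats.modify "mission_success" [] (· ++ [log]) else cats
  let cats := if PySem.Str.isIn "powered down" msg || PySem.Str.isIn "shutdown" msg then cats.modify "shutdown" [] (· ++ [log]) else cats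
  cats

def detect_issue_categories (parsed_logs : List (List (String × String))) : List (String × List (List (String × String))) :=
  (parsed_logs.foldl pvStep (PySem.Dict.ofList
    [("vibration", []), ("cooling_temperature", []), ("thrust", []),
     ("guidance_sensor", []), ("structure_booster", []), ("telemetry_comm", []),
     ("oxygen_tank", []), ("mission_success", []), ("shutdown", [])])).items

-- ===== PORT B =====
def pvRules : List (String × List String) :=
  [("vibration", ["vibration"]),
   ("cooling_temperature", ["cooling", "temperature", "heat", "overheat"]),
   ("thrust", ["thrust"]),
   ("guidance_sensor", ["guidance", "sensor data", "trajectory", "deviating", "navigation"]),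
   ("structure_booster", ["structural integrity", "booster assembly", "booster section", "structural damage"]),
   ("telemetry_comm", ["telemetry", "signal lost", "communication lost", "communication failure", "link lost", "data loss"]),
   ("oxygen_tank", ["oxygen", "tank", "unstable", "explosion", "explode"]),
   ("mission_success", ["mission completed successfully", "mission objectives achieved", "satellite deployment successful", "safely landed"]),
   ("shutdown", ["powered down", "shutdown"])]

def detect_issue_categories_alt (parsed_logs : List (List (String × String))) : List (String × List (List (String × String))) :=
  pvRules.map (fun r =>
    (r.1, parsed_logs.filter (fun log => r.2.any (fun kw => PySem.Str.isIn kw (pvLow log)))))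

-- ===== PRECONDITION & SPEC =====
-- Pre_ excludes exactly the logs without a "message" key, on which A raises KeyError.
def Pre_detect_issue_categories (parsed_logs : List (List (String × String))) : Prop :=
  (parsed_logs.all (fun log => ((PySem.Dict.ofList log).get? "message").isSome)) = true
instance (parsed_logs : List (List (String × String))) : Decidable (Pre_detect_issue_categories parsed_logs) := by unfold Pre_detect_issue_categories; infer_instance
def pvWitness_detect_issue_categories : (List (List (String × String))) :=
  [[("message", "Vibration detected in booster section"), ("time", "T+31")],
   [("message", "all nominal")]]

def Spec_detect_issue_categories (parsed_logs : List (List (String × String))) (out : List (String × List (List (String × String)))) : Prop := out = detect_issue_categories_alt parsed_logs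
instance (parsed_logs : List (List (String × String))) (out : List (String × List (List (String × String)))) : Decidable (Spec_detect_issue_categories parsed_logs out) := by unfold Spec_detect_issue_categories; infer_instance

-- ===== CLAIM (what is proved, stated in full; the proofs are below) =====
def Claim_equal_detect_issue_categories : Prop := ∀ (parsed_logs : List (List (String × String))), Dom_detect_issue_categories parsed_logs → Pre_detect_issue_categories parsed_logs → Spec_detect_issue_categories parsed_logs (detect_issue_categories parsed_logs)

-- ===== LEMMAS AND PROOFS =====

-- the nine per-category predicates, in A's (left-associated) or-chain form
def q1 (log : List (String × String)) : Bool := PySem.Str.isIn "vibration" (pvLow log)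
def q2 (log : List (String × String)) : Bool := PySem.Str.isIn "cooling" (pvLow log) || PySem.Str.isIn "temperature" (pvLow log) || PySem.Str.isIn "heat" (pvLow log) || PySem.Str.isIn "overheat" (pvLow log)
def q3 (log : List (String × String)) : Bool := PySem.Str.isIn "thrust" (pvLow log)
def q4 (log : List (String × String)) : Bool := PySem.Str.isIn "guidance" (pvLow log) || PySem.Str.isIn "sensor data" (pvLow log) || PySem.Str.isIn "trajectory" (pvLow log) || PySem.Str.isIn "deviating" (pvLow log) || PySem.Str.isIn "navigation" (pvLow log)
def q5 (log : List (String × String)) : Bool := PySem.Str.isIn "structural integrity" (pvLow log) || PySem.Str.isIn "booster assembly" (pvLow log) || PySem.Str.isIn "booster section" (pvLow log) || PySem.Str.isIn "structural damage" (pvLow log)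
def q6 (log : List (String × String)) : Bool := PySem.Str.isIn "telemetry" (pvLow log) || PySem.Str.isIn "signal lost" (pvLow log) || PySem.Str.isIn "communication lost" (pvLow log) || PySem.Str.isIn "communication failure" (pvLow log) || PySem.Str.isIn "link lost" (pvLow log) || PySem.Str.isIn "data loss" (pvLow log)
def q7 (log : List (String × String)) : Bool := PySem.Str.isIn "oxygen" (pvLow log) || PySem.Str.isIn "tank" (pvLow log) || PySem.Str.isIn "unstable" (pvLow log) || PySem.Str.isIn "explosion" (pvLow log) || PySem.Str.isIn "explode" (pvLow log)
def q8 (log : List (String × String)) : Bool := PySem.Str.isIn "mission completed successfully" (pvLow log) || PySem.Str.isIn "mission objectives achieved" (pvLow log) || PySem.Str.isIn "satellite deployment successful" (pvLow log) || PySem.Str.isIn "safely landed" (pvLow log)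
def q9 (log : List (String × String)) : Bool := PySem.Str.isIn "powered down" (pvLow log) || PySem.Str.isIn "shutdown" (pvLow log)

-- the nine-key dict with given value lists
def mkd (l1 l2 l3 l4 l5 l6 l7 l8 l9 : List (List (String × String))) : PySem.Dict String (List (List (String × String))) :=
  PySem.Dict.ofList
    [("vibration", l1), ("cooling_temperature", l2), ("thrust", l3),
     ("guidance_sensor", l4), ("structure_booster", l5), ("telemetry_comm", l6),
     ("oxygen_tank", l7), ("mission_success", l8), ("shutdown", l9)]

theorem items_mkd (l1 l2 l3 l4 l5 l6 l7 l8 l9 : List (List (String × String))) :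
    (mkd l1 l2 l3 l4 l5 l6 l7 l8 l9).items =
      [("vibration", l1), ("cooling_temperature", l2), ("thrust", l3),
       ("guidance_sensor", l4), ("structure_booster", l5), ("telemetry_comm", l6),
       ("oxygen_tank", l7), ("mission_success", l8), ("shutdown", l9)] := by
  simp [mkd, PySem.Dict.ofList, PySem.Dict.update, PySem.Dict.insert, PySem.Dict.contains, PySem.Dict.empty]

theorem cm1 (b : Bool) (g : List (String × String)) (l1 l2 l3 l4 l5 l6 l7 l8 l9 : List (List (String × String))) :
    (if b = true then (mkd l1 l2 l3 l4 l5 l6 l7 l8 l9).modify "vibration" [] (· ++ [g]) else mkd l1 l2 l3 l4 l5 l6 l7 l8 l9) =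
      mkd (l1 ++ if b = true then [g] else []) l2 l3 l4 l5 l6 l7 l8 l9 := by
  cases b <;> simp [mkd, PySem.Dict.ofList, PySem.Dict.update, PySem.Dict.insert, PySem.Dict.contains, PySem.Dict.empty, PySem.Dict.modify, PySem.Dict.getD, PySem.Dict.get?]

theorem cm2 (b : Bool) (g : List (String × String)) (l1 l2 l3 l4 l5 l6 l7 l8 l9 : List (List (String × String))) :
    (if b = true then (mkd l1 l2 l3 l4 l5 l6 l7 l8 l9).modify "cooling_temperature" [] (· ++ [g]) else mkd l1 l2 l3 l4 l5 l6 l7 l8 l9) =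
      mkd l1 (l2 ++ if b = true then [g] else []) l3 l4 l5 l6 l7 l8 l9 := by
  cases b <;> simp [mkd, PySem.Dict.ofList, PySem.Dict.update, PySem.Dict.insert, PySem.Dict.contains, PySem.Dict.empty, PySem.Dict.modify, PySem.Dict.getD, PySem.Dict.get?]

theorem cm3 (b : Bool) (g : List (String × String)) (l1 l2 l3 l4 l5 l6 l7 l8 l9 : List (List (String × String))) :
    (if b = true then (mkd l1 l2 l3 l4 l5 l6 l7 l8 l9).modify "thrust" [] (· ++ [g]) else mkd l1 l2 l3 l4 l5 l6 l7 l8 l9) =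
      mkd l1 l2 (l3 ++ if b = true then [g] else []) l4 l5 l6 l7 l8 l9 := by
  cases b <;> simp [mkd, PySem.Dict.ofList, PySem.Dict.update, PySem.Dict.insert, PySem.Dict.contains, PySem.Dict.empty, PySem.Dict.modify, PySem.Dict.getD, PySem.Dict.get?]

theorem cm4 (b : Bool) (g : List (String × String)) (l1 l2 l3 l4 l5 l6 l7 l8 l9 : List (List (String × String))) :
    (if b = true then (mkd l1 l2 l3 l4 l5 l6 l7 l8 l9).modify "guidance_sensor" [] (· ++ [g]) else mkd l1 l2 l3 l4 l5 l6 l7 l8 l9) =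
      mkd l1 l2 l3 (l4 ++ if b = true then [g] else []) l5 l6 l7 l8 l9 := by
  cases b <;> simp [mkd, PySem.Dict.ofList, PySem.Dict.update, PySem.Dict.insert, PySem.Dict.contains, PySem.Dict.empty, PySem.Dict.modify, PySem.Dict.getD, PySem.Dict.get?]

theorem cm5 (b : Bool) (g : List (String × String)) (l1 l2 l3 l4 l5 l6 l7 l8 l9 : List (List (String × String))) :
    (if b = true then (mkd l1 l2 l3 l4 l5 l6 l7 l8 l9).modify "structure_booster" [] (· ++ [g]) else mkd l1 l2 l3 l4 l5 l6 l7 l8 l9) =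
      mkd l1 l2 l3 l4 (l5 ++ if b = true then [g] else []) l6 l7 l8 l9 := by
  cases b <;> simp [mkd, PySem.Dict.ofList, PySem.Dict.update, PySem.Dict.insert, PySem.Dict.contains, PySem.Dict.empty, PySem.Dict.modify, PySem.Dict.getD, PySem.Dict.get?]

theorem cm6 (b : Bool) (g : List (String × String)) (l1 l2 l3 l4 l5 l6 l7 l8 l9 : List (List (String × String))) :
    (if b = true then (mkd l1 l2 l3 l4 l5 l6 l7 l8 l9).modify "telemetry_comm" [] (· ++ [g]) else mkd l1 l2 l3 l4 l5 l6 l7 l8 l9) =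
      mkd l1 l2 l3 l4 l5 (l6 ++ if b = true then [g] else []) l7 l8 l9 := by
  cases b <;> simp [mkd, PySem.Dict.ofList, PySem.Dict.update, PySem.Dict.insert, PySem.Dict.contains, PySem.Dict.empty, PySem.Dict.modify, PySem.Dict.getD, PySem.Dict.get?]

theorem cm7 (b : Bool) (g : List (String × String)) (l1 l2 l3 l4 l5 l6 l7 l8 l9 : List (List (String × String))) :
    (if b = true then (mkd l1 l2 l3 l4 l5 l6 l7 l8 l9).modify "oxygen_tank" [] (· ++ [g]) else mkd l1 l2 l3 l4 l5 l6 l7 l8 l9) =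
      mkd l1 l2 l3 l4 l5 l6 (l7 ++ if b = true then [g] else []) l8 l9 := by
  cases b <;> simp [mkd, PySem.Dict.ofList, PySem.Dict.update, PySem.Dict.insert, PySem.Dict.contains, PySem.Dict.empty, PySem.Dict.modify, PySem.Dict.getD, PySem.Dict.get?]

theorem cm8 (b : Bool) (g : List (String × String)) (l1 l2 l3 l4 l5 l6 l7 l8 l9 : List (List (String × String))) :
    (if b = true then (mkd l1 l2 l3 l4 l5 l6 l7 l8 l9).modify "mission_success" [] (· ++ [g]) else mkd l1 l2 l3 l4 l5 l6 l7 l8 l9) =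
      mkd l1 l2 l3 l4 l5 l6 l7 (l8 ++ if b = true then [g] else []) l9 := by
  cases b <;> simp [mkd, PySem.Dict.ofList, PySem.Dict.update, PySem.Dict.insert, PySem.Dict.contains, PySem.Dict.empty, PySem.Dict.modify, PySem.Dict.getD, PySem.Dict.get?]

theorem cm9 (b : Bool) (g : List (String × String)) (l1 l2 l3 l4 l5 l6 l7 l8 l9 : List (List (String × String))) :
    (if b = true then (mkd l1 l2 l3 l4 l5 l6 l7 l8 l9).modify "shutdown" [] (· ++ [g]) else mkd l1 l2 l3 l4 l5 l6 l7 l8 l9) =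
      mkd l1 l2 l3 l4 l5 l6 l7 l8 (l9 ++ if b = true then [g] else []) := by
  cases b <;> simp [mkd, PySem.Dict.ofList, PySem.Dict.update, PySem.Dict.insert, PySem.Dict.contains, PySem.Dict.empty, PySem.Dict.modify, PySem.Dict.getD, PySem.Dict.get?]

theorem step_mkd (g : List (String × String)) (l1 l2 l3 l4 l5 l6 l7 l8 l9 : List (List (String × String))) :
    pvStep (mkd l1 l2 l3 l4 l5 l6 l7 l8 l9) g =
      mkd (l1 ++ if q1 g then [g] else []) (l2 ++ if q2 g then [g] else [])
          (l3 ++ if q3 g then [g] else []) (l4 ++ if q4 g then [g] else [])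
          (l5 ++ if q5 g then [g] else []) (l6 ++ if q6 g then [g] else [])
          (l7 ++ if q7 g then [g] else []) (l8 ++ if q8 g then [g] else [])
          (l9 ++ if q9 g then [g] else []) := by
  simp only [pvStep]
  rw [cm1, cm2, cm3, cm4, cm5, cm6, cm7, cm8, cm9]
  rfl

theorem fold_mkd (logs : List (List (String × String))) (l1 l2 l3 l4 l5 l6 l7 l8 l9 : List (List (String × String))) :
    logs.foldl pvStep (mkd l1 l2 l3 l4 l5 l6 l7 l8 l9) =
      mkd (l1 ++ logs.filter q1) (l2 ++ logs.filter q2) (l3 ++ logs.filter q3)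
          (l4 ++ logs.filter q4) (l5 ++ logs.filter q5) (l6 ++ logs.filter q6)
          (l7 ++ logs.filter q7) (l8 ++ logs.filter q8) (l9 ++ logs.filter q9) := by
  induction logs generalizing l1 l2 l3 l4 l5 l6 l7 l8 l9 with
  | nil => simp
  | cons g t ih =>
      have hb : ∀ (b : Bool) (xs : List (List (String × String))),
          ((if b = true then [g] else []) ++ xs) = if b = true then g :: xs else xs := by
        intro b xs; cases b <;> simp
      simp only [List.foldl_cons, step_mkd, ih, List.filter_cons, List.append_assoc, hb]

-- ===== VERDICT (by name: the statement is the Claim_ definition above) =====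
theorem detect_issue_categories_spec : Claim_equal_detect_issue_categories := by
  intro logs _ _
  show _ = _
  rw [detect_issue_categories, show (PySem.Dict.ofList
    [("vibration", ([] : List (List (String × String)))), ("cooling_temperature", []), ("thrust", []),
     ("guidance_sensor", []), ("structure_booster", []), ("telemetry_comm", []),
     ("oxygen_tank", []), ("mission_success", []), ("shutdown", [])]) = mkd [] [] [] [] [] [] [] [] [] from rfl,
    fold_mkd, items_mkd]
  have hf : ∀ (p p' : List (String × String) → Bool), (∀ x, p x = p' x) →
      List.filter p logs = List.filter p' logs := by
    intro p p' h
    exact List.filter_congr (fun x _ => h x)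
  simp only [detect_issue_categories_alt, pvRules, List.map_cons, List.map_nil,
    List.nil_append, List.cons.injEq, Prod.mk.injEq, true_and, and_true]
  and_intros <;>
    (apply hf; intro x;
     simp [q1, q2, q3, q4, q5, q6, q7, q8, q9, List.any_cons, List.any_nil, Bool.or_assoc])
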